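-- pv_equiv track=rewrite | github.com/pypi-data/pypi-mirror-358 | packages/opsinpy/opsinpy-0.1.0.tar.gz/opsinpy-0.1.0/tests/test_complex_iupac_names.py | _analyze_smiles_features
-- ===== SOURCE A (Python) =====
-- def _analyze_smiles_features(smiles):
--     """Analyze key chemical features in a SMILES string for structural comparison."""
--     if not smiles:
--         return {}
--
--     features = {
--         # Count different atom types
--         "carbon_count": smiles.count("C"),
--         "nitrogen_count": smiles.count("N"),
--         "oxygen_count": smiles.count("O"),
--         "sulfur_count": smiles.count("S"),
--         "phosphorus_count": smiles.count("P"),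
--         "fluorine_count": smiles.count("F"),
--         "chlorine_count": smiles.count("Cl"),
--         "bromine_count": smiles.count("Br"),
--         "iodine_count": smiles.count("I"),
--         # Count bond types
--         "single_bonds": smiles.count("-") if "-" in smiles else 0,
--         "double_bonds": smiles.count("="),
--         "triple_bonds": smiles.count("#"),
--         # Count rings (approximate)
--         "ring_closures": sum(1 for c in smiles if c.isdigit()),
--         # Count stereochemistry markers
--         "chiral_centers": smiles.count("@"),
--         "double_bond_stereo": smiles.count("/") + smiles.count("\\"),
--         # Count brackets (for complex atoms)
--         "bracketed_atoms": smiles.count("["),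
--         # Length as a rough complexity measure
--         "length": len(smiles),
--     }
--
--     return features
-- ===== SOURCE B (Python) =====
-- def _analyze_smiles_features(smiles):
--     """Analyze key chemical features in a SMILES string for structural comparison."""
--     if not smiles:
--         return {}
--
--     counts = {}
--     cl = br = digits = 0
--     prev = None
--     for ch in smiles:
--         counts[ch] = counts.get(ch, 0) + 1
--         if ch.isdigit():
--             digits += 1
--         if prev == "C" and ch == "l":
--             cl += 1
--         elif prev == "B" and ch == "r":
--             br += 1
--         prev = ch
--
--     g = counts.get
--     return {
--         "carbon_count": g("C", 0),
--         "nitrogen_count": g("N", 0),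
--         "oxygen_count": g("O", 0),
--         "sulfur_count": g("S", 0),
--         "phosphorus_count": g("P", 0),
--         "fluorine_count": g("F", 0),
--         "chlorine_count": cl,
--         "bromine_count": br,
--         "iodine_count": g("I", 0),
--         "single_bonds": g("-", 0),
--         "double_bonds": g("=", 0),
--         "triple_bonds": g("#", 0),
--         "ring_closures": digits,
--         "chiral_centers": g("@", 0),
--         "double_bond_stereo": g("/", 0) + g("\\", 0),
--         "bracketed_atoms": g("[", 0),
--         "length": len(smiles),
--     }
-- ===== Notes on version B (the rewrite author's own statement) =====
-- stated objective: alternative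
-- what changed: A scans the string seventeen times (one str.count/sum/len pass per feature); B makes a single pass maintaining a per-character count dict plus running tallies for the 'Cl'/'Br' pairs and digits, then assembles the same dict.
import Mathlib
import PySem

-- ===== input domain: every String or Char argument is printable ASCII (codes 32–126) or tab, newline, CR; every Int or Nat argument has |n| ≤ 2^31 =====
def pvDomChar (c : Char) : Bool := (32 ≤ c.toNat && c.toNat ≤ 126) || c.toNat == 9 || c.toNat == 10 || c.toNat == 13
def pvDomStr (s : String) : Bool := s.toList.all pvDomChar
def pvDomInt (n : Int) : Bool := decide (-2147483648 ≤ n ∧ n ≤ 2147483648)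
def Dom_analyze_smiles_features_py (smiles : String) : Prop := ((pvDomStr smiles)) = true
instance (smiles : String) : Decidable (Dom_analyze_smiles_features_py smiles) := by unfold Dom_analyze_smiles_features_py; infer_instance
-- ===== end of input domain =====

-- B replaces A's seventeen independent scans of the string by one single pass that maintains
-- per-character counts plus tallies for the 'Cl'/'Br' pairs and digits (objective: alternative).

-- ===== PORT A =====
def analyze_smiles_features_py (smiles : String) : List (String × Int) :=
  if smiles = "" then []
  else
    [("carbon_count", (PySem.Str.count smiles "C" : Int)),
     ("nitrogen_count", (PySem.Str.count smiles "N" : Int)),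
     ("oxygen_count", (PySem.Str.count smiles "O" : Int)),
     ("sulfur_count", (PySem.Str.count smiles "S" : Int)),
     ("phosphorus_count", (PySem.Str.count smiles "P" : Int)),
     ("fluorine_count", (PySem.Str.count smiles "F" : Int)),
     ("chlorine_count", (PySem.Str.count smiles "Cl" : Int)),
     ("bromine_count", (PySem.Str.count smiles "Br" : Int)),
     ("iodine_count", (PySem.Str.count smiles "I" : Int)),
     ("single_bonds", if PySem.Str.isIn "-" smiles then (PySem.Str.count smiles "-" : Int) else 0),
     ("double_bonds", (PySem.Str.count smiles "=" : Int)),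
     ("triple_bonds", (PySem.Str.count smiles "#" : Int)),
     -- sum(1 for c in smiles if c.isdigit())
     ("ring_closures", ((smiles.toList.filter (fun c => PySem.Chars.isdigit c)).map (fun _ => (1 : Int))).sum),
     ("chiral_centers", (PySem.Str.count smiles "@" : Int)),
     ("double_bond_stereo", (PySem.Str.count smiles "/" : Int) + (PySem.Str.count smiles "\\" : Int)),
     ("bracketed_atoms", (PySem.Str.count smiles "[" : Int)),
     ("length", (PySem.Str.len smiles : Int))]

-- ===== PORT B =====
-- the single pass of Source B: state = (counts dict, cl, br, digits, prev)
def analyzeLoopB : List Char → PySem.Dict Char Int × Int × Int × Int × Option Char →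
    PySem.Dict Char Int × Int × Int × Int × Option Char
  | [], st => st
  | ch :: t, (d, cl, br, dg, prev) =>
      let d' := d.insert ch (d.getD ch 0 + 1)
      let dg' := if PySem.Chars.isdigit ch then dg + 1 else dg
      let clbr :=
        if prev = some 'C' ∧ ch = 'l' then (cl + 1, br)
        else if prev = some 'B' ∧ ch = 'r' then (cl, br + 1)
        else (cl, br)
      analyzeLoopB t (d', clbr.1, clbr.2, dg', some ch)

def analyze_smiles_features_py_alt (smiles : String) : List (String × Int) :=
  if smiles = "" then []
  else
    let st := analyzeLoopB smiles.toList (PySem.Dict.empty, 0, 0, 0, none)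
    let d := st.1
    [("carbon_count", d.getD 'C' 0),
     ("nitrogen_count", d.getD 'N' 0),
     ("oxygen_count", d.getD 'O' 0),
     ("sulfur_count", d.getD 'S' 0),
     ("phosphorus_count", d.getD 'P' 0),
     ("fluorine_count", d.getD 'F' 0),
     ("chlorine_count", st.2.1),
     ("bromine_count", st.2.2.1),
     ("iodine_count", d.getD 'I' 0),
     ("single_bonds", d.getD '-' 0),
     ("double_bonds", d.getD '=' 0),
     ("triple_bonds", d.getD '#' 0),
     ("ring_closures", st.2.2.2.1),
     ("chiral_centers", d.getD '@' 0),
     ("double_bond_stereo", d.getD '/' 0 + d.getD '\\' 0),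
     ("bracketed_atoms", d.getD '[' 0),
     ("length", (PySem.Str.len smiles : Int))]

-- ===== PRECONDITION & SPEC =====
def Spec_analyze_smiles_features_py (smiles : String) (out : List (String × Int)) : Prop := out = analyze_smiles_features_py_alt smiles
instance (smiles : String) (out : List (String × Int)) : Decidable (Spec_analyze_smiles_features_py smiles out) := by unfold Spec_analyze_smiles_features_py; infer_instance

-- ===== CLAIM (what is proved, stated in full; the proofs are below) =====
def Claim_equal_analyze_smiles_features_py : Prop := ∀ (smiles : String), Dom_analyze_smiles_features_py smiles → Spec_analyze_smiles_features_py smiles (analyze_smiles_features_py smiles)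

-- ===== LEMMAS AND PROOFS =====

-- number of (overlapping) adjacent pairs (a, b) in the list
def pairs2 (a b : Char) : List Char → Int
  | x :: y :: t => (if x = a ∧ y = b then 1 else 0) + pairs2 a b (y :: t)
  | _ => 0

-- same, but seeded with the previous character (Source B's `prev`)
def pairsP (a b : Char) (p : Option Char) : List Char → Int
  | [] => 0
  | c :: t => (if p = some a ∧ c = b then 1 else 0) + pairsP a b (some c) t

lemma go_nil (sub : List Char) (fuel acc : Nat) : PySem.Chars.count.go sub fuel [] acc = acc := by
  cases fuel <;> simp [PySem.Chars.count.go]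

lemma go_single (c : Char) : ∀ (fuel : Nat) (l : List Char) (acc : Nat), l.length ≤ fuel →
    PySem.Chars.count.go [c] fuel l acc = acc + l.count c := by
  intro fuel
  induction fuel with
  | zero => intro l acc h; cases l with
    | nil => simp [go_nil]
    | cons x t => simp at h
  | succ n ih => intro l acc h; cases l with
    | nil => simp [go_nil]
    | cons x t =>
      simp only [PySem.Chars.count.go]
      by_cases hx : x = c
      · simp [hx, List.isPrefixOf, ih t (acc + 1) (by simpa using h)]
        omega
      · have hne : ¬ (c = x) := fun hh => hx hh.symm
        simp [List.isPrefixOf, hne, ih t acc (by simpa using h), hx]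

lemma count_single (s : List Char) (c : Char) : PySem.Chars.count s [c] = s.count c := by
  simp [PySem.Chars.count, go_single c s.length s 0 le_rfl]

lemma go_pair (a b : Char) (hab : a ≠ b) : ∀ (fuel : Nat) (l : List Char) (acc : Nat), l.length ≤ fuel →
    (PySem.Chars.count.go [a, b] fuel l acc : Int) = acc + pairs2 a b l := by
  intro fuel
  induction fuel with
  | zero => intro l acc h; cases l with
    | nil => simp [go_nil, pairs2]
    | cons x t => simp at h
  | succ n ih => intro l acc h; cases l with
    | nil => simp [go_nil, pairs2]
    | cons x t =>
      cases t with
      | nil =>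
        simp only [PySem.Chars.count.go]
        have hp : [a, b].isPrefixOf [x] = false := by simp [List.isPrefixOf]
        simp [hp, pairs2, go_nil]
      | cons y u =>
        simp only [PySem.Chars.count.go]
        by_cases hx : x = a ∧ y = b
        · have hp : [a, b].isPrefixOf (x :: y :: u) = true := by
            simp [List.isPrefixOf, hx.1, hx.2]
          rw [hp]
          simp only [if_true]
          have hd : List.drop [a, b].length (x :: y :: u) = u := rfl
          rw [hd, ih u (acc + 1) (by simp at h ⊢; omega)]
          have hyu : pairs2 a b (y :: u) = pairs2 a b u := by
            cases u with
            | nil => simp [pairs2]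
            | cons z v =>
              have hy : ¬ (y = a) := by rw [hx.2]; exact fun hh => hab hh.symm
              simp [pairs2, hy]
          rw [show pairs2 a b (x :: y :: u) = 1 + pairs2 a b (y :: u) by simp [pairs2, hx]]
          rw [hyu]; push_cast; ring
        · have hp : [a, b].isPrefixOf (x :: y :: u) = false := by
            show (a == x && ([b].isPrefixOf (y :: u))) = false
            show (a == x && (b == y && ([].isPrefixOf u))) = false
            simp only [List.isPrefixOf_nil_left, Bool.and_true, Bool.and_eq_false_iff]
            rcases Decidable.em (x = a) with h1 | h1
            · right; subst h1
              simp only [beq_eq_false_iff_ne, ne_eq]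
              intro h2; exact hx ⟨rfl, h2.symm⟩
            · left; simp only [beq_eq_false_iff_ne, ne_eq]
              exact fun hh => h1 hh.symm
          rw [hp]
          simp only [Bool.false_eq_true, if_false]
          rw [ih (y :: u) acc (by simp at h ⊢; omega)]
          simp [pairs2, hx]

lemma count_pair (s : List Char) (a b : Char) (hab : a ≠ b) :
    (PySem.Chars.count s [a, b] : Int) = pairs2 a b s := by
  simp [PySem.Chars.count, go_pair a b hab s.length s 0 le_rfl]

lemma pairsP_some (a b : Char) : ∀ (l : List Char) (p : Char),
    pairsP a b (some p) l = pairs2 a b (p :: l) := by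
  intro l
  induction l with
  | nil => intro p; simp [pairsP, pairs2]
  | cons c t ih =>
    intro p
    simp only [pairsP, pairs2, ih c]
    congr 1
    simp

lemma pairsP_none (a b : Char) (l : List Char) : pairsP a b none l = pairs2 a b l := by
  cases l with
  | nil => simp [pairsP, pairs2]
  | cons c t =>
    simp only [pairsP, pairsP_some]
    cases t with
    | nil => simp [pairs2]
    | cons y u => simp [pairs2]

lemma analyzeLoopB_spec : ∀ (l : List Char) (d : PySem.Dict Char Int) (cl br dg : Int) (p : Option Char),
    analyzeLoopB l (d, cl, br, dg, p) =
      (l.foldl (fun d x => d.insert x (d.getD x 0 + 1)) d,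
       cl + pairsP 'C' 'l' p l,
       br + pairsP 'B' 'r' p l,
       dg + (l.countP PySem.Chars.isdigit : Int),
       l.foldl (fun _ c => some c) p) := by
  intro l
  induction l with
  | nil => intro d cl br dg p; simp [analyzeLoopB, pairsP]
  | cons c t ih =>
    intro d cl br dg p
    simp only [analyzeLoopB, ih, List.foldl_cons, pairsP, List.countP_cons]
    by_cases hC : p = some 'C' ∧ c = 'l'
    · have hB : ¬ (p = some 'B' ∧ c = 'r') := by
        rintro ⟨hp2, _⟩; rw [hC.1] at hp2; simp at hp2
      simp only [if_pos hC, if_neg hB, Prod.mk.injEq]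
      refine ⟨trivial, by ring, by ring, ?_, trivial⟩
      split_ifs <;> push_cast <;> ring
    · by_cases hB : p = some 'B' ∧ c = 'r'
      · simp only [if_neg hC, if_pos hB, Prod.mk.injEq]
        refine ⟨trivial, by ring, by ring, ?_, trivial⟩
        split_ifs <;> push_cast <;> ring
      · simp only [if_neg hC, if_neg hB, Prod.mk.injEq]
        refine ⟨trivial, by ring, by ring, ?_, trivial⟩
        split_ifs <;> push_cast <;> ring

lemma str_count_single (s : String) (c : Char) (sub : String) (hsub : sub.toList = [c]) :
    (PySem.Str.count s sub : Int) = ((s.toList.count c : Nat) : Int) := by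
  simp [PySem.Str.count, hsub, count_single]

-- ===== VERDICT (by name: the statement is the Claim_ definition above) =====
theorem analyze_smiles_features_py_spec : Claim_equal_analyze_smiles_features_py := by
  intro smiles _
  unfold Spec_analyze_smiles_features_py analyze_smiles_features_py analyze_smiles_features_py_alt
  by_cases hs : smiles = ""
  · simp [hs]
  · simp only [hs, if_false]
    have hcl : (PySem.Str.count smiles "Cl" : Int) = pairs2 'C' 'l' smiles.toList := by
      have : ("Cl" : String).toList = ['C', 'l'] := by decide
      simp [PySem.Str.count, this, count_pair smiles.toList 'C' 'l' (by decide)]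
    have hbr : (PySem.Str.count smiles "Br" : Int) = pairs2 'B' 'r' smiles.toList := by
      have : ("Br" : String).toList = ['B', 'r'] := by decide
      simp [PySem.Str.count, this, count_pair smiles.toList 'B' 'r' (by decide)]
    have hsb : (if PySem.Str.isIn "-" smiles then (PySem.Str.count smiles "-" : Int) else 0)
        = ((smiles.toList.count '-' : Nat) : Int) := by
      by_cases hin : PySem.Str.isIn "-" smiles = true
      · rw [if_pos hin, str_count_single smiles '-' "-" (by decide)]
      · rw [if_neg hin]
        have h0 : '-' ∉ smiles.toList := by
          intro hmem
          apply hin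
          simp only [PySem.Str.isIn]
          rw [PySem.Chars.isIn_iff_infix]
          have : ("-" : String).toList = ['-'] := by decide
          rw [this]
          exact (List.singleton_infix_iff '-' smiles.toList).mpr hmem
        rw [List.count_eq_zero.mpr h0]
        simp
    have hsum : ((smiles.toList.filter (fun c => PySem.Chars.isdigit c)).map (fun _ => (1 : Int))).sum
        = ((smiles.toList.countP PySem.Chars.isdigit : Nat) : Int) := by
      rw [PySem.List.sum_map_const_int, List.countP_eq_length_filter]
      ring
    simp only [analyzeLoopB_spec, pairsP_none]
    simp only [PySem.Dict.getD_foldl_insert_add_one, PySem.Dict.getD_empty]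
    rw [hcl, hbr, hsb, hsum,
       str_count_single smiles 'C' "C" (by decide),
       str_count_single smiles 'N' "N" (by decide),
       str_count_single smiles 'O' "O" (by decide),
       str_count_single smiles 'S' "S" (by decide),
       str_count_single smiles 'P' "P" (by decide),
       str_count_single smiles 'F' "F" (by decide),
       str_count_single smiles 'I' "I" (by decide),
       str_count_single smiles '=' "=" (by decide),
       str_count_single smiles '#' "#" (by decide),
       str_count_single smiles '@' "@" (by decide),
       str_count_single smiles '/' "/" (by decide),
       str_count_single smiles '\\' "\\" (by decide),
       str_count_single smiles '[' "[" (by decide)]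
    norm_num
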